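-- pv_equiv track=rewrite | github.com/mewebbie/NPTEL-DSA-using-Python | WEEK2.py | primeproduct
-- ===== SOURCE A (Python) =====
-- def isprime(m):
--     list = []
--     for i in range(1,m+1):
--         if m%i==0:
--             list+=[i]
--         if len(list)>2:
--             return False
--     return True
--
-- def primeproduct(m):
--     if m<0:
--         return False
--     for i in range(1,m+1):
--         for j in range(m,1,-1):
--             if isprime(i) and isprime(j):
--                 if i*j == m:
--                     return True
--     return False
-- ===== SOURCE B (Python) =====
-- def smallest_factor(n):
--     d = 2
--     while d * d <= n:
--         if n % d == 0:
--             return d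
--         d += 1
--     return n
--
-- def primeproduct(m):
--     if m < 2:
--         return False
--     p = smallest_factor(m)
--     q = m // p
--     return q == 1 or smallest_factor(q) == q
-- ===== Notes on version B (the rewrite author's own statement) =====
-- stated objective: faster
-- what changed: Replaced the cubic double loop over all candidate factor pairs, each tested by enumerating every divisor, with a single trial division up to the square root: find the smallest prime factor and test whether the remaining cofactor is trivial or itself prime.
import Mathlib
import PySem

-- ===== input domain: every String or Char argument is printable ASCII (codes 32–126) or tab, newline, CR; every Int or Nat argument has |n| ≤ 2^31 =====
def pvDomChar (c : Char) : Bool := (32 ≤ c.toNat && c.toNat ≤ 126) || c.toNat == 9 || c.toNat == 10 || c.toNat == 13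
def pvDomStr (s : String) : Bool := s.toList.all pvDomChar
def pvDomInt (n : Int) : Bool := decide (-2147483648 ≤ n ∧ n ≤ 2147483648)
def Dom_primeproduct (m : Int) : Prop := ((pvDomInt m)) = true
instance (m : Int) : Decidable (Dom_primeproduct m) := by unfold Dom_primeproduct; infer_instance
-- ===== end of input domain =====

-- B replaces A's exhaustive search over all factor pairs by one trial division up to the square root (objective: faster, as measured).

-- ===== PORT A =====
-- A's isprime: collect divisors of m in a list, return False as soon as it holds three
def isprimeGo (m : Int) : List Int → List Int → Bool
  | [], _ => true
  | i :: rest, l =>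
    let l' := if PySem.Int.mod m i == 0 then l ++ [i] else l
    if l'.length > 2 then false else isprimeGo m rest l'

def isprimeA (m : Int) : Bool := isprimeGo m (PySem.List.pyRange 1 (m+1) 1) []

def primeproduct (m : Int) : Bool :=
  if m < 0 then false
  else (PySem.List.pyRange 1 (m+1) 1).any fun i =>
    (PySem.List.pyRange m 1 (-1)).any fun j =>
      isprimeA i && isprimeA j && (i * j == m)

-- ===== PORT B =====
-- B's smallest_factor loop: d = 2; while d*d <= n: if n % d == 0: return d; d += 1; return n
def sfGo (n : Int) (d : Int) : Int :=
  if h : d * d ≤ n then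
    (if PySem.Int.mod n d == 0 then d else sfGo n (d + 1))
  else n
termination_by (n + 1 - d).toNat
decreasing_by
  have h1 : 2 * d ≤ n + 1 := by nlinarith [sq_nonneg (d - 1)]
  have h2 : 0 ≤ n := le_trans (mul_self_nonneg d) h
  omega

def smallestFactor (n : Int) : Int := sfGo n 2

def primeproduct_alt (m : Int) : Bool :=
  if m < 2 then false
  else
    let p := smallestFactor m
    let q := PySem.Int.floordiv m p
    (q == 1) || (smallestFactor q == q)

-- ===== PRECONDITION & SPEC =====
def Spec_primeproduct (m : Int) (out : Bool) : Prop := out = primeproduct_alt m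
instance (m : Int) (out : Bool) : Decidable (Spec_primeproduct m out) := by unfold Spec_primeproduct; infer_instance

-- ===== CLAIM (what is proved, stated in full; the proofs are below) =====
def Claim_equal_primeproduct : Prop := ∀ (m : Int), Dom_primeproduct m → Spec_primeproduct m (primeproduct m)

-- ===== LEMMAS AND PROOFS =====

-- m is prime or a product of two primes (the function's purpose), on natAbs
def SP (n : Nat) : Prop := n.Prime ∨ ∃ a b : Nat, a.Prime ∧ b.Prime ∧ a * b = n

theorem sfGo_eq_minFac (n : Int) : ∀ (d : Int), 2 ≤ n → 2 ≤ d →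
    (∀ k : Int, 2 ≤ k → k < d → ¬ k ∣ n) → sfGo n d = (n.natAbs.minFac : Int) := by
  intro d
  induction d using sfGo.induct n with
  | case1 d h hmod =>
    intro hn hd hinv
    rw [sfGo, dif_pos h, if_pos hmod]
    have hdvd : d ∣ n := by
      have := (PySem.Int.mod_eq_zero_iff_dvd n d).mp (by simpa using hmod)
      exact this
    have hne1 : n.natAbs ≠ 1 := by omega
    have hple : n.natAbs.minFac ≤ d.natAbs :=
      Nat.minFac_le_of_dvd (by omega) (Int.natAbs_dvd_natAbs.mpr hdvd)
    have hpp : n.natAbs.minFac.Prime := Nat.minFac_prime hne1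
    have hged : ¬ ((n.natAbs.minFac : Int) < d) := by
      intro hlt
      exact hinv _ (by exact_mod_cast hpp.two_le) hlt
        (by rw [Int.natCast_dvd]; exact Nat.minFac_dvd _)
    omega
  | case2 d h hmod ih =>
    intro hn hd hinv
    rw [sfGo, dif_pos h, if_neg hmod]
    apply ih hn (by omega)
    intro k hk2 hkd hkdvd
    rcases lt_or_eq_of_le (by omega : k ≤ d) with hlt | rfl
    · exact hinv k hk2 hlt hkdvd
    · exact hmod (by
        simpa using (PySem.Int.mod_eq_zero_iff_dvd n k).mpr hkdvd)
  | case3 d h =>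
    intro hn hd hinv
    rw [sfGo, dif_neg h]
    have hprime : n.natAbs.Prime := by
      by_contra hnp
      have hsq : n.natAbs.minFac ^ 2 ≤ n.natAbs := Nat.minFac_sq_le_self (by omega) hnp
      have hpp : n.natAbs.minFac.Prime := Nat.minFac_prime (by omega)
      have hlt : (n.natAbs.minFac : Int) < d := by
        have h1 : ((n.natAbs.minFac : Int)) * (n.natAbs.minFac : Int) ≤ n := by
          have := hsq
          rw [pow_two] at this
          calc ((n.natAbs.minFac : Int)) * (n.natAbs.minFac : Int)
              = ((n.natAbs.minFac * n.natAbs.minFac : Nat) : Int) := by push_cast; ring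
            _ ≤ ((n.natAbs : Nat) : Int) := by exact_mod_cast this
            _ = n := by omega
        nlinarith [hpp.two_le]
      exact hinv _ (by exact_mod_cast hpp.two_le) hlt
        (by rw [Int.natCast_dvd]; exact Nat.minFac_dvd _)
    rw [hprime.minFac_eq]
    omega

theorem smallestFactor_eq (n : Int) (hn : 2 ≤ n) :
    smallestFactor n = (n.natAbs.minFac : Int) := by
  apply sfGo_eq_minFac n 2 hn le_rfl
  intro k hk hk2 _
  omega

theorem isprimeGo_iff (m : Int) (rest : List Int) : ∀ (l : List Int), l.length ≤ 2 →
    ((isprimeGo m rest l = true) ↔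
      l.length + rest.countP (fun i => PySem.Int.mod m i == 0) ≤ 2) := by
  induction rest with
  | nil => intro l hl; simpa [isprimeGo] using hl
  | cons i rest ih =>
    intro l hl
    rw [isprimeGo]
    by_cases hp : (PySem.Int.mod m i == 0) = true
    · simp only [hp, if_pos, List.countP_cons, List.length_append, List.length_singleton]
      by_cases hlen : l.length + 1 > 2
      · simp only [if_pos hlen]
        simp; omega
      · rw [if_neg (by simpa using hlen)]
        rw [ih (l ++ [i]) (by simp; omega)]
        simp; omega
    · simp only [hp, Bool.false_eq_true, ite_false, List.countP_cons]
      rw [if_neg (by omega)]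
      rw [ih l hl]
      simp

theorem countP_le_two {l : List Int} (hnd : l.Nodup) (p : Int → Bool) (a b : Int)
    (h : ∀ x ∈ l, p x = true → x = a ∨ x = b) : l.countP p ≤ 2 := by
  rw [List.countP_eq_length_filter]
  have hf : (l.filter p).Nodup := hnd.filter p
  have hsub : (l.filter p).toFinset ⊆ {a, b} := by
    intro x hx
    simp only [List.mem_toFinset, List.mem_filter] at hx
    rcases h x hx.1 hx.2 with rfl | rfl <;> simp
  calc (l.filter p).length = (l.filter p).toFinset.card :=
        (List.toFinset_card_of_nodup hf).symm
    _ ≤ ({a, b} : Finset Int).card := Finset.card_le_card hsub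
    _ ≤ 2 := Finset.card_le_two

theorem three_le_countP {l : List Int} (hnd : l.Nodup) (p : Int → Bool) (a b c : Int)
    (ha : a ∈ l) (hb : b ∈ l) (hc : c ∈ l)
    (pa : p a = true) (pb : p b = true) (pc : p c = true)
    (hab : a ≠ b) (hac : a ≠ c) (hbc : b ≠ c) : 3 ≤ l.countP p := by
  rw [List.countP_eq_length_filter]
  have hf : (l.filter p).Nodup := hnd.filter p
  have hsub : ({a, b, c} : Finset Int) ⊆ (l.filter p).toFinset := by
    intro x hx
    simp only [Finset.mem_insert, Finset.mem_singleton] at hx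
    simp only [List.mem_toFinset, List.mem_filter]
    rcases hx with rfl | rfl | rfl
    · exact ⟨ha, pa⟩
    · exact ⟨hb, pb⟩
    · exact ⟨hc, pc⟩
  have hcard : ({a, b, c} : Finset Int).card = 3 := by
    rw [Finset.card_insert_of_notMem (by simp [hab, hac]),
      Finset.card_insert_of_notMem (by simp [hbc]), Finset.card_singleton]
  calc 3 = ({a, b, c} : Finset Int).card := hcard.symm
    _ ≤ (l.filter p).toFinset.card := Finset.card_le_card hsub
    _ = (l.filter p).length := List.toFinset_card_of_nodup hf

theorem mod_beq_iff (k x : Int) : ((PySem.Int.mod k x == 0) = true) ↔ x ∣ k := by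
  rw [beq_iff_eq]; exact PySem.Int.mod_eq_zero_iff_dvd k x

theorem isprimeA_iff (k : Int) (hk : 1 ≤ k) :
    isprimeA k = true ↔ (k = 1 ∨ Nat.Prime k.natAbs) := by
  rw [isprimeA, isprimeGo_iff k _ [] (by simp)]
  simp only [List.length_nil, Nat.zero_add]
  constructor
  · intro hle
    by_contra hcon
    push Not at hcon
    obtain ⟨hk1, hnp⟩ := hcon
    have hk2 : 2 ≤ k := by omega
    have hpp : k.natAbs.minFac.Prime := Nat.minFac_prime (by omega)
    have hplt : k.natAbs.minFac < k.natAbs :=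
      (Nat.not_prime_iff_minFac_lt (by omega)).mp hnp
    have hp2 : 2 ≤ (k.natAbs.minFac : Int) := by exact_mod_cast hpp.two_le
    have hpltk : (k.natAbs.minFac : Int) < k := by omega
    have h3 := three_le_countP (PySem.List.nodup_pyRange_one 1 (k+1))
      (fun i => PySem.Int.mod k i == 0) 1 (k.natAbs.minFac : Int) k
      (by rw [PySem.List.mem_pyRange_one]; omega)
      (by rw [PySem.List.mem_pyRange_one]; omega)
      (by rw [PySem.List.mem_pyRange_one]; omega)
      ((mod_beq_iff k 1).mpr (one_dvd k))
      ((mod_beq_iff k _).mpr (by rw [Int.natCast_dvd]; exact Nat.minFac_dvd _))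
      ((mod_beq_iff k k).mpr dvd_rfl)
      (by omega) (by omega) (by omega)
    omega
  · intro h
    rcases h with rfl | hpr
    · decide
    · apply countP_le_two (PySem.List.nodup_pyRange_one 1 (k+1)) _ 1 k
      intro x hx hpx
      rw [PySem.List.mem_pyRange_one] at hx
      have hdvd : x.natAbs ∣ k.natAbs :=
        Int.natAbs_dvd_natAbs.mpr ((mod_beq_iff k x).mp hpx)
      rcases hpr.eq_one_or_self_of_dvd _ hdvd with h1 | h2
      · left; omega
      · right; omega

theorem a_iff (m : Int) (hm : 0 ≤ m) : primeproduct m = true ↔ SP m.natAbs := by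
  rw [primeproduct, if_neg (by omega)]
  simp only [List.any_eq_true]
  constructor
  · rintro ⟨i, hi, j, hj, hcond⟩
    rw [PySem.List.mem_pyRange_one] at hi
    rw [PySem.List.mem_pyRange_neg_one] at hj
    simp only [Bool.and_eq_true, beq_iff_eq] at hcond
    obtain ⟨⟨hip, hjp⟩, hij⟩ := hcond
    have hjA := (isprimeA_iff j (by omega)).mp hjp
    have hjprime : Nat.Prime j.natAbs := by
      rcases hjA with h | h
      · exact absurd h (by omega)
      · exact h
    rcases (isprimeA_iff i hi.1).mp hip with rfl | hiprime
    · rw [one_mul] at hij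
      subst hij
      exact Or.inl hjprime
    · exact Or.inr ⟨i.natAbs, j.natAbs, hiprime, hjprime, by rw [← Int.natAbs_mul, hij]⟩
  · intro hsp
    rcases hsp with hpr | ⟨a, b, hap, hbp, hab⟩
    · have hm2 : 2 ≤ m := by have := hpr.two_le; omega
      refine ⟨1, by rw [PySem.List.mem_pyRange_one]; omega,
        m, by rw [PySem.List.mem_pyRange_neg_one]; omega, ?_⟩
      simp only [Bool.and_eq_true, beq_iff_eq]
      exact ⟨⟨(isprimeA_iff 1 le_rfl).mpr (Or.inl rfl),
        (isprimeA_iff m (by omega)).mpr (Or.inr hpr)⟩, one_mul m⟩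
    · have ha2 : 2 ≤ a := hap.two_le
      have hb2 : 2 ≤ b := hbp.two_le
      have hle_a : a ≤ a * b := Nat.le_mul_of_pos_right a (by omega)
      have hle_b : b ≤ a * b := Nat.le_mul_of_pos_left b (by omega)
      have hprod : ((a * b : Nat) : Int) = m := by omega
      refine ⟨(a : Int), by rw [PySem.List.mem_pyRange_one]; omega,
        (b : Int), by rw [PySem.List.mem_pyRange_neg_one]; omega, ?_⟩
      simp only [Bool.and_eq_true, beq_iff_eq]
      refine ⟨⟨?_, ?_⟩, by push_cast at hprod ⊢; linarith⟩
      · exact (isprimeA_iff (a : Int) (by omega)).mpr (Or.inr (by simpa using hap))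
      · exact (isprimeA_iff (b : Int) (by omega)).mpr (Or.inr (by simpa using hbp))

theorem alt_iff (m : Int) (hm : 0 ≤ m) : primeproduct_alt m = true ↔ SP m.natAbs := by
  by_cases hm2 : m < 2
  · rw [primeproduct_alt, if_pos hm2]
    constructor
    · intro h; exact absurd h (by simp)
    · intro hsp
      exfalso
      rcases hsp with hpr | ⟨a, b, hap, hbp, hab⟩
      · have := hpr.two_le; omega
      · have := Nat.mul_le_mul hap.two_le hbp.two_le; omega
  · push Not at hm2
    rw [primeproduct_alt, if_neg (by omega)]
    have hmn : m = (m.natAbs : Int) := by omega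
    have hn2 : 2 ≤ m.natAbs := by omega
    set n := m.natAbs with hn
    show ((PySem.Int.floordiv m (smallestFactor m) == 1)
        || (smallestFactor (PySem.Int.floordiv m (smallestFactor m))
            == PySem.Int.floordiv m (smallestFactor m))) = true ↔ SP n
    rw [smallestFactor_eq m hm2]
    have hq : PySem.Int.floordiv m (n.minFac : Int) = ((n / n.minFac : Nat) : Int) := by
      rw [hmn]; exact_mod_cast PySem.Int.floordiv_natCast n n.minFac
    rw [hq]
    set q := n / n.minFac with hqdef
    have hdvd : n.minFac ∣ n := Nat.minFac_dvd n
    have hfact : n.minFac * q = n := Nat.mul_div_cancel' hdvd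
    have hpp : n.minFac.Prime := Nat.minFac_prime (by omega)
    by_cases hq1 : q = 1
    · have hnp : n.Prime := by
        rw [hq1, mul_one] at hfact
        rw [← hfact]; exact hpp
      constructor
      · intro _; exact Or.inl hnp
      · intro _; simp [hq1]
    · have hq2 : 2 ≤ q := by
        have h1 : 1 ≤ q := (Nat.one_le_div_iff hpp.pos).mpr (Nat.minFac_le (by omega))
        omega
      rw [smallestFactor_eq (q : Int) (by exact_mod_cast hq2)]
      simp only [Int.natAbs_natCast]
      have hqne : (((q : Nat) : Int) == 1) = false := by simp; omega
      rw [hqne, Bool.false_or, beq_iff_eq, Int.natCast_inj]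
      constructor
      · intro hmf
        exact Or.inr ⟨n.minFac, q, hpp, Nat.prime_def_minFac.mpr ⟨hq2, hmf⟩, hfact⟩
      · intro hsp
        rcases hsp with hpr | ⟨a, b, hap, hbp, hab⟩
        · exfalso
          rcases hpr.eq_one_or_self_of_dvd n.minFac hdvd with h1 | h1
          · have := hpp.two_le; omega
          · rw [h1] at hfact
            have : n * q = n * 1 := by rw [mul_one]; exact hfact
            have := Nat.eq_of_mul_eq_mul_left (by omega : 0 < n) this
            omega
        · have hd' : n.minFac ∣ a * b := hab ▸ hdvd
          rcases (Nat.Prime.dvd_mul hpp).mp hd' with hda | hdb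
          · have hea : n.minFac = a := (Nat.prime_dvd_prime_iff_eq hpp hap).mp hda
            have hqb : q = b := by
              apply Nat.eq_of_mul_eq_mul_left hpp.pos
              calc n.minFac * q = n := hfact
                _ = a * b := hab.symm
                _ = n.minFac * b := by rw [hea]
            rw [hqb]; exact hbp.minFac_eq
          · have heb : n.minFac = b := (Nat.prime_dvd_prime_iff_eq hpp hbp).mp hdb
            have hqa : q = a := by
              apply Nat.eq_of_mul_eq_mul_left hpp.pos
              calc n.minFac * q = n := hfact
                _ = a * b := hab.symm
                _ = n.minFac * a := by rw [heb]; ring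
            rw [hqa]; exact hap.minFac_eq

-- ===== VERDICT (by name: the statement is the Claim_ definition above) =====
theorem primeproduct_spec : Claim_equal_primeproduct := by
  intro m _
  show primeproduct m = primeproduct_alt m
  by_cases hm : 0 ≤ m
  · have h := (a_iff m hm).trans (alt_iff m hm).symm
    exact Bool.eq_iff_iff.mpr h
  · have hm' : m < 0 := by omega
    rw [primeproduct, if_pos hm', primeproduct_alt, if_pos (by omega)]
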